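-- pv_equiv track=rewrite | github.com/shreyasaidugari/paper-category-prediction-ml | app.py | research_style_score
-- ===== SOURCE A (Python) =====
-- def research_style_score(text):
--     research_words = [
--         "paper", "research", "study", "proposed", "method", "model",
--         "approach", "analysis", "result", "experiment", "dataset",
--         "algorithm", "performance", "prediction", "classification",
--         "training", "evaluation", "framework", "system", "learning",
--         "network", "accuracy", "abstract", "technical"
--     ]
--     words = text.split()
--     score = sum(1 for word in words if word in research_words)
--     return score
-- ===== SOURCE B (Python) =====
-- def research_style_score(text):
--     vocab = ("paper research study proposed method model approach analysis "
--              "result experiment dataset algorithm performance prediction "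
--              "classification training evaluation framework system learning "
--              "network accuracy abstract technical").split()
--     words = text.split()
--
--     def tally(vs):
--         if not vs:
--             return 0
--         return words.count(vs[0]) + tally(vs[1:])
--
--     return tally(vocab)
-- ===== Notes on version B (the rewrite author's own statement) =====
-- stated objective: alternative
-- what changed: Inverts the traversal: instead of scanning the text's words and testing each against the vocabulary list, B recurses over the fixed 24-word vocabulary (kept as one space-separated string split at runtime) and sums words.count(v) for each vocabulary word; correct because the vocabulary has no duplicates.
import Mathlib
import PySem

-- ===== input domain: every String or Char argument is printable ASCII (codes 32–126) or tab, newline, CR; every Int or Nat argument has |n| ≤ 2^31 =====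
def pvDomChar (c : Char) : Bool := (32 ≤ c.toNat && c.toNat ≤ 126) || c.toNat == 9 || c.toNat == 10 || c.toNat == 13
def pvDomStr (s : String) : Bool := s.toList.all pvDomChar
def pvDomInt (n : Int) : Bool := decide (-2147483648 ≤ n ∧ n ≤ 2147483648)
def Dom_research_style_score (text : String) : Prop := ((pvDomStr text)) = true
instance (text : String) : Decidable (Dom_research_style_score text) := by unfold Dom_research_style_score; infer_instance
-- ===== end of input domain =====

-- B (alternative, same cost): inverts the traversal — recursion over the fixed vocabulary
-- summing words.count(v), instead of a pass over the text's words testing membership.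

-- ===== PORT A =====
-- words = text.split(); score = sum(1 for word in words if word in research_words)
def research_style_score (text : String) : Int :=
  let research_words : List String :=
    ["paper", "research", "study", "proposed", "method", "model",
     "approach", "analysis", "result", "experiment", "dataset",
     "algorithm", "performance", "prediction", "classification",
     "training", "evaluation", "framework", "system", "learning",
     "network", "accuracy", "abstract", "technical"]
  let words := PySem.Str.split₀ text
  words.foldl (fun score word => if word ∈ research_words then score + 1 else score) 0

-- ===== PORT B =====
-- vocab = "paper research … technical".split()
def bVocab : List String :=
  PySem.Str.split₀ ("paper research study proposed method model approach analysis result experiment dataset algorithm performance prediction classification training evaluation framework system learning network accuracy abstract technical")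

-- def tally(vs): return 0 if not vs else words.count(vs[0]) + tally(vs[1:])
def bTally (words : List String) : List String → Int
  | [] => 0
  | v :: vs => PySem.List.count words v + bTally words vs

def research_style_score_alt (text : String) : Int :=
  bTally (PySem.Str.split₀ text) bVocab

-- ===== PRECONDITION & SPEC =====
def Spec_research_style_score (text : String) (out : Int) : Prop := out = research_style_score_alt text
instance (text : String) (out : Int) : Decidable (Spec_research_style_score text out) := by unfold Spec_research_style_score; infer_instance

-- ===== CLAIM (what is proved, stated in full; the proofs are below) =====
def Claim_equal_research_style_score : Prop := ∀ (text : String), Dom_research_style_score text → Spec_research_style_score text (research_style_score text)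

-- ===== LEMMAS AND PROOFS =====

-- B's recursion is the sum of the counts of the vocabulary words.
theorem bTally_eq_sum (ws : List String) (vocab : List String) :
    bTally ws vocab = (vocab.map (fun w => (ws.count w : Int))).sum := by
  induction vocab with
  | nil => simp [bTally]
  | cons v vs ih => simp [bTally, ih, PySem.List.count_eq]

-- Pointwise sum of two mapped lists splits.
theorem sum_map_add (f g : String → Int) (l : List String) :
    (l.map (fun w => f w + g w)).sum = (l.map f).sum + (l.map g).sum := by
  induction l with
  | nil => simp
  | cons x xs ih => simp [ih]; ring

-- Over a duplicate-free list, summing the indicator of x equals membership.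
theorem sum_indicator_nodup (x : String) (l : List String) (h : l.Nodup) :
    (l.map (fun w => if w = x then (1 : Int) else 0)).sum = if x ∈ l then 1 else 0 := by
  induction l with
  | nil => simp
  | cons v vs ih =>
    have hv : v ∉ vs := (List.nodup_cons.mp h).1
    have hnd : vs.Nodup := (List.nodup_cons.mp h).2
    simp only [List.map_cons, List.sum_cons, ih hnd, List.mem_cons]
    by_cases hvx : v = x
    · subst hvx
      simp [hv]
    · simp [hvx, Ne.symm hvx]

-- Summing each vocabulary word's count over a duplicate-free vocabulary equals A's
-- one-pass membership count.
theorem sum_counts_eq_fold (vocab : List String) (hnd : vocab.Nodup) (ws : List String) :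
    (vocab.map (fun w => (ws.count w : Int))).sum
      = ws.foldl (fun acc word => if word ∈ vocab then acc + 1 else acc) 0 := by
  induction ws with
  | nil => simp
  | cons x xs ih =>
    have hcnt : ∀ w : String, ((x :: xs).count w : Int)
        = (xs.count w : Int) + (if w = x then 1 else 0) := by
      intro w
      by_cases hwx : w = x
      · simp [hwx]
      · simp [hwx, Ne.symm hwx]
    calc (vocab.map (fun w => ((x :: xs).count w : Int))).sum
        = (vocab.map (fun w => (xs.count w : Int) + (if w = x then 1 else 0))).sum := by
          apply congrArg; exact List.map_congr_left (fun w _ => hcnt w)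
      _ = (vocab.map (fun w => (xs.count w : Int))).sum
            + (vocab.map (fun w => if w = x then (1 : Int) else 0)).sum :=
          sum_map_add _ _ vocab
      _ = xs.foldl (fun acc word => if word ∈ vocab then acc + 1 else acc) 0
            + (if x ∈ vocab then 1 else 0) := by
          rw [ih, sum_indicator_nodup x vocab hnd]
      _ = (x :: xs).foldl (fun acc word => if word ∈ vocab then acc + 1 else acc) 0 := by
          simp only [List.foldl_cons]
          by_cases hx : x ∈ vocab
          · simp only [hx, if_true]
            rw [PySem.List.foldl_ite_add_one, PySem.List.foldl_ite_add_one]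
            ring
          · simp [hx]

-- The runtime-split vocabulary of B is exactly A's literal word list.
theorem bVocab_eq :
    bVocab = ["paper", "research", "study", "proposed", "method", "model",
     "approach", "analysis", "result", "experiment", "dataset",
     "algorithm", "performance", "prediction", "classification",
     "training", "evaluation", "framework", "system", "learning",
     "network", "accuracy", "abstract", "technical"] := by
  set_option maxRecDepth 8192 in decide

-- ===== VERDICT (by name: the statement is the Claim_ definition above) =====
theorem research_style_score_spec : Claim_equal_research_style_score := by
  intro text _
  unfold Spec_research_style_score research_style_score research_style_score_alt
  rw [bTally_eq_sum, bVocab_eq, sum_counts_eq_fold _ (by decide)]
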